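-- pv_equiv track=rewrite | github.com/530154436/py_learning | outsourcing/src/entity/abstract_base.py | calc_h_index
-- ===== SOURCE A (Python) =====
-- from typing import List
--
-- def calc_h_index(citations: List[int]) -> int:
--     """
--     H-index是一个数字，由Jorge Hirsch于2005年开始使用，旨在描述科研人员的科学生产力和影响力。
--     H-index是通过对同一个科研人员所发表的文章个数及每篇文章他引的次数不低于发表文章个数进行计算的。
--     例如：H-index为17意味着该科研人员发表了至少17篇论文，且每篇论文被引用了至少17次。
--         如果该科研人员被引用次数最多的第18次出版物仅被引用10次，则h指数将保持在17。
--         如果该科研人员被引用次数最多的第18次出版物被18次或更多次引用，则h索引将升高到18。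
--     我们假设引用次数为m，引用次数大于等于m的论文有n篇，那么只要m>=n，那么一就能得到一个h指数=n（但这里的h指数不一定是最大）：
--         h=min(m,n) if m>=n
--     那么如何寻找最大的那个h指数呢？首先如果考虑暴力搜索，那么时间复杂度时O(n^2)
--     但如果首先根据引用次数多少进行排序，对于第i个元素，我们就可以得到这个等式：
--         h指数=论文引用次数大于等于citations[i]的数目=len(citations)-i
--     从上面可知，从前往后遍历h指数只能是越来越小（因为i越来越大），于是只需找到第一个满足h指数条件对应的h即可。
--     https://zhuanlan.zhihu.com/p/388589868
--     """
--     citations.sort()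
--     result = 0
--     cite_num = len(citations)
--     for i in range(0, cite_num):
--         if citations[i] >= cite_num - i:
--             result = cite_num - i
--             break
--     return result
-- ===== SOURCE B (Python) =====
-- def calc_h_index(citations):
--     n = len(citations)
--     cnt = [0] * (n + 1)
--     for c in citations:
--         cnt[min(max(c, 0), n)] += 1
--     total = 0
--     for h in range(n, 0, -1):
--         total += cnt[h]
--         if total >= h:
--             return h
--     return 0
-- ===== Notes on version B (the rewrite author's own statement) =====
-- stated objective: alternative
-- what changed: Replaces sort-then-scan (first index i of the ascending sort with citations[i] >= n-i) by a counting/bucket pass: tally citations clamped into [0,n], then walk h from n down accumulating a suffix sum until total >= h; O(n) operations vs O(n log n), though not measurably faster in CPython.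
import Mathlib
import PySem

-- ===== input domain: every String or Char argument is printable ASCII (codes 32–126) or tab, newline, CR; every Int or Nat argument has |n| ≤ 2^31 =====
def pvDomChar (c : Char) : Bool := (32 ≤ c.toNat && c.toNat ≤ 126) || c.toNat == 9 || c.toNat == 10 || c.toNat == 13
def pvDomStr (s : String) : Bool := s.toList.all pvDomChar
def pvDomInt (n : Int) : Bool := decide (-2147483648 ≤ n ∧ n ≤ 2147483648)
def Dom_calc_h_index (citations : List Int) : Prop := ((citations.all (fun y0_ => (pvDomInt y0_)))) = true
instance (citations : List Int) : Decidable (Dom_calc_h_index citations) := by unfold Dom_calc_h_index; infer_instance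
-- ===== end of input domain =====

-- B replaces A's sort-then-scan with a counting/bucket pass (tally clamped citations, then suffix sums) — a different algorithm, not measurably faster in CPython;
-- Python A sorts `citations` in place (an observable mutation B does not perform) — the equivalence is about the return value.

-- ===== PORT A =====
-- for i in range(0, cite_num): if citations[i] >= cite_num - i: result = cite_num - i; break
def calcHAux (s : List Int) (i : Nat) : Int :=
  if h : i < s.length then
    if (s.length : Int) - (i : Int) ≤ s[i] then (s.length : Int) - (i : Int)
    else calcHAux s (i + 1)
  else 0
termination_by s.length - i

def calc_h_index (citations : List Int) : Int :=
  calcHAux (PySem.List.sorted citations (fun x => x) false) 0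

-- ===== PORT B =====
-- cnt = [0]*(n+1); for c in citations: cnt[min(max(c, 0), n)] += 1
def buildCnt (citations : List Int) (n : Nat) : List Int :=
  citations.foldl
    (fun cnt c =>
      let k := (min (max c 0) (n : Int)).toNat   -- index min(max(c,0),n): nonnegative and ≤ n, exact
      cnt.set k (cnt.getD k 0 + 1))
    (List.replicate (n + 1) 0)

-- total = 0; for h in range(n, 0, -1): total += cnt[h]; if total >= h: return h
-- return 0
def suffixLoop (cnt : List Int) : Int → Nat → Int
  | _, 0 => 0
  | total, h + 1 =>
    let t := total + cnt.getD (h + 1) 0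
    if ((h : Int) + 1) ≤ t then (h : Int) + 1 else suffixLoop cnt t h

def calc_h_index_alt (citations : List Int) : Int :=
  let n := citations.length
  suffixLoop (buildCnt citations n) 0 n

-- ===== PRECONDITION & SPEC =====
def Spec_calc_h_index (citations : List Int) (out : Int) : Prop := out = calc_h_index_alt citations
instance (citations : List Int) (out : Int) : Decidable (Spec_calc_h_index citations out) := by unfold Spec_calc_h_index; infer_instance

-- ===== CLAIM (what is proved, stated in full; the proofs are below) =====
def Claim_equal_calc_h_index : Prop := ∀ (citations : List Int), Dom_calc_h_index citations → Spec_calc_h_index citations (calc_h_index citations)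

-- ===== LEMMAS AND PROOFS =====

-- Common reference value: the largest h ≤ bound with at least h citations ≥ h (0 if none).
def hRef (l : List Int) : Nat → Int
  | 0 => 0
  | h + 1 =>
    if h + 1 ≤ l.countP (fun c => decide ((h : Int) + 1 ≤ c)) then (h : Int) + 1
    else hRef l h

theorem hRef_congr_perm (l l' : List Int) (hp : l.Perm l') : ∀ k, hRef l k = hRef l' k := by
  intro k
  induction k with
  | zero => rfl
  | succ h ih => simp [hRef, hp.countP_eq, ih]

-- ---- A side ----

theorem sorted_cond (s : List Int) (hs : s.Pairwise (· ≤ ·)) (i h : Nat)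
    (hlen : i + (h + 1) = s.length) :
    (((h : Int) + 1) ≤ s[i]'(by omega)) ↔
      h + 1 ≤ s.countP (fun c => decide ((h : Int) + 1 ≤ c)) := by
  have hi : i < s.length := by omega
  rw [List.pairwise_iff_getElem] at hs
  constructor
  · intro hge
    have hdrop : (s.drop i).countP (fun c => decide ((h : Int) + 1 ≤ c)) = (s.drop i).length := by
      rw [List.countP_eq_length]
      intro a ha
      rcases List.mem_iff_getElem.mp ha with ⟨j, hj, rfl⟩
      have hij : i + j < s.length := by
        have := hj; rw [List.length_drop] at this; omega
      rw [List.getElem_drop]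
      have hmono : s[i] ≤ s[i + j]'hij := by
        by_cases hj0 : j = 0
        · subst hj0; simp
        · exact hs i (i + j) hi hij (by omega)
      simp only [decide_eq_true_eq]
      omega
    have hsplit : s.countP (fun c => decide ((h : Int) + 1 ≤ c)) =
        (s.take i).countP (fun c => decide ((h : Int) + 1 ≤ c)) +
        (s.drop i).countP (fun c => decide ((h : Int) + 1 ≤ c)) := by
      rw [← List.countP_append, List.take_append_drop]
    rw [hsplit, hdrop]
    simp [List.length_drop]
    omega
  · intro hcnt
    by_contra hlt
    rw [not_le] at hlt
    have htake : (s.take (i + 1)).countP (fun c => decide ((h : Int) + 1 ≤ c)) = 0 := by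
      rw [List.countP_eq_zero]
      intro a ha
      rcases List.mem_iff_getElem.mp ha with ⟨j, hj, rfl⟩
      have hjlen : j < s.length := by
        have := hj; rw [List.length_take] at this; omega
      rw [List.getElem_take]
      have hle : s[j]'hjlen ≤ s[i] := by
        have hji : j ≤ i := by rw [List.length_take] at hj; omega
        rcases Nat.lt_or_ge j i with hji' | hji'
        · exact hs j i hjlen hi hji'
        · have : j = i := by omega
          subst this; exact le_refl _
      simp only [decide_eq_true_eq]
      omega
    have hsplit : s.countP (fun c => decide ((h : Int) + 1 ≤ c)) =
        (s.take (i + 1)).countP (fun c => decide ((h : Int) + 1 ≤ c)) +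
        (s.drop (i + 1)).countP (fun c => decide ((h : Int) + 1 ≤ c)) := by
      rw [← List.countP_append, List.take_append_drop]
    have hdle : (s.drop (i + 1)).countP (fun c => decide ((h : Int) + 1 ≤ c)) ≤
        (s.drop (i + 1)).length := List.countP_le_length
    rw [hsplit, htake] at hcnt
    rw [List.length_drop] at hdle
    omega

theorem calcHAux_eq (s : List Int) (hs : s.Pairwise (· ≤ ·)) :
    ∀ k i, i + k = s.length → calcHAux s i = hRef s k := by
  intro k
  induction k with
  | zero =>
    intro i hi
    have hnot : ¬ i < s.length := by omega
    rw [calcHAux, dif_neg hnot]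
    rfl
  | succ h ih =>
    intro i hi
    have hilt : i < s.length := by omega
    rw [calcHAux]
    rw [dif_pos hilt]
    have hval : (s.length : Int) - (i : Int) = (h : Int) + 1 := by omega
    rw [hval]
    by_cases hc : ((h : Int) + 1) ≤ s[i]
    · rw [if_pos hc, hRef, if_pos ((sorted_cond s hs i h hi).mp hc)]
    · rw [if_neg hc, hRef, if_neg (fun hcc => hc ((sorted_cond s hs i h hi).mpr hcc)),
        ih (i + 1) (by omega)]

theorem calc_h_index_eq_hRef (citations : List Int) :
    calc_h_index citations = hRef citations citations.length := by
  unfold calc_h_index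
  rw [calcHAux_eq _ (by simpa using PySem.List.sorted_pairwise citations (fun x => x))
      citations.length 0 (by simp [PySem.List.length_sorted]),
    hRef_congr_perm _ _ (PySem.List.sorted_perm citations (fun x => x) false)]

-- ---- B side ----

theorem buildCnt_getD (l : List Int) (n : Nat) (k : Nat) (_hk : k ≤ n) :
    (buildCnt l n).getD k 0 = (l.countP (fun c => (min (max c 0) (n : Int)).toNat == k) : Int) := by
  unfold buildCnt
  suffices h : ∀ (cnt : List Int), cnt.length = n + 1 →
      (l.foldl (fun cnt c =>
        cnt.set (min (max c 0) (n : Int)).toNat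
          (cnt.getD (min (max c 0) (n : Int)).toNat 0 + 1)) cnt).getD k 0 =
      cnt.getD k 0 + (l.countP (fun c => (min (max c 0) (n : Int)).toNat == k) : Int) by
    have := h (List.replicate (n + 1) 0) (by simp)
    simpa [List.getD] using this
  induction l with
  | nil => intro cnt _; simp
  | cons c t ih =>
    intro cnt hlen
    simp only [List.foldl_cons, List.countP_cons]
    rw [ih _ (by simp [hlen])]
    have hj : (min (max c 0) (n : Int)).toNat < cnt.length := by omega
    by_cases he : (min (max c 0) (n : Int)).toNat = k
    · rw [he] at hj
      simp only [he]
      have hset : (cnt.set k (cnt.getD k 0 + 1)).getD k 0 = cnt.getD k 0 + 1 := by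
        simp [List.getD, hj]
      rw [hset]
      simp only [beq_self_eq_true, if_true]
      push_cast
      ring
    · have hset : (cnt.set (min (max c 0) (n : Int)).toNat
          (cnt.getD (min (max c 0) (n : Int)).toNat 0 + 1)).getD k 0 = cnt.getD k 0 := by
        simp [List.getD, hj, he]
      rw [hset]
      simp only [beq_iff_eq, he, if_false]
      push_cast
      ring

theorem countP_clamp_split (l : List Int) (n m : Nat) :
    l.countP (fun c => decide (m ≤ (min (max c 0) (n : Int)).toNat)) =
      l.countP (fun c => (min (max c 0) (n : Int)).toNat == m) +
      l.countP (fun c => decide (m + 1 ≤ (min (max c 0) (n : Int)).toNat)) := by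
  induction l with
  | nil => simp
  | cons c t ih =>
    simp only [List.countP_cons, ih, beq_iff_eq, decide_eq_true_eq]
    split_ifs with h1 h2 h3 h2 h3 <;> omega

theorem countP_clamp_eq (l : List Int) (n h : Nat) (hn : h + 1 ≤ n) :
    l.countP (fun c => decide (h + 1 ≤ (min (max c 0) (n : Int)).toNat)) =
      l.countP (fun c => decide ((h : Int) + 1 ≤ c)) := by
  apply List.countP_congr
  intro c _
  simp only [decide_eq_true_eq]
  omega

theorem suffixLoop_eq (l : List Int) (n : Nat) (hn : n = l.length) :
    ∀ (h : Nat) (total : Int), h ≤ n →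
      total = (l.countP (fun c => decide (h + 1 ≤ (min (max c 0) (n : Int)).toNat)) : Int) →
      suffixLoop (buildCnt l n) total h = hRef l h := by
  intro h
  induction h with
  | zero => intro total _ _; rfl
  | succ h ih =>
    intro total hle htot
    rw [suffixLoop]
    have ht : total + (buildCnt l n).getD (h + 1) 0 =
        (l.countP (fun c => decide (h + 1 ≤ (min (max c 0) (n : Int)).toNat)) : Int) := by
      rw [htot, buildCnt_getD l n (h + 1) hle]
      rw [countP_clamp_split l n (h + 1)]
      push_cast
      ring
    rw [ht, countP_clamp_eq l n h hle]
    by_cases hc : h + 1 ≤ l.countP (fun c => decide ((h : Int) + 1 ≤ c))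
    · rw [if_pos (by exact_mod_cast hc), hRef, if_pos hc]
    · rw [if_neg (by exact_mod_cast hc), hRef, if_neg hc]
      rw [← countP_clamp_eq l n h hle]
      exact ih _ (by omega) rfl

theorem calc_h_index_alt_eq_hRef (citations : List Int) :
    calc_h_index_alt citations = hRef citations citations.length := by
  show suffixLoop (buildCnt citations citations.length) 0 citations.length
      = hRef citations citations.length
  apply suffixLoop_eq citations citations.length rfl citations.length 0 (le_refl _)
  have h0 : citations.countP
      (fun c => decide (citations.length + 1 ≤ (min (max c 0) ((citations.length : Nat) : Int)).toNat)) = 0 :=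
    List.countP_eq_zero.mpr (by
      intro a _
      simp only [decide_eq_true_eq, not_le]
      omega)
  rw [h0]
  simp

-- ===== VERDICT (by name: the statement is the Claim_ definition above) =====
theorem calc_h_index_spec : Claim_equal_calc_h_index := by
  intro citations _
  unfold Spec_calc_h_index
  rw [calc_h_index_eq_hRef, calc_h_index_alt_eq_hRef]
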